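-- pv_equiv track=rewrite | github.com/networkbm/OCR-Screenshot-Renamer | captioner.py | _is_good_caption_candidate
-- ===== SOURCE A (Python) =====
-- OCR_NOISE_WORDS = {
--     "the",
--     "and",
--     "for",
--     "with",
--     "from",
--     "this",
--     "that",
--     "page",
--     "screen",
--     "window",
--     "button",
--     "menu",
--     "search",
--     "dashboard",
--     "settings",
--     "home",
--     "open",
--     "close",
--     "cancel",
--     "save",
--     "edit",
--     "view",
-- }
--
-- def _is_id_like_token(token: str) -> bool:
--     lowered = token.lower()
--     if len(lowered) >= 14 and any(ch.isdigit() for ch in lowered) and any(ch.isalpha() for ch in lowered):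
--         return True
--     if len(lowered) >= 10 and lowered.count("-") >= 2 and any(ch.isdigit() for ch in lowered):
--         return True
--     if lowered.endswith(".png") or lowered.endswith(".jpg") or lowered.endswith(".jpeg"):
--         return True
--     return False
--
-- def _is_word_like_token(token: str) -> bool:
--     lowered = token.lower()
--     if _is_id_like_token(lowered):
--         return False
--     alpha_count = sum(1 for ch in lowered if ch.isalpha())
--     return alpha_count >= 3
--
-- def _is_good_caption_candidate(tokens: list[str]) -> bool:
--     if not tokens:
--         return False
--     word_like = [token for token in tokens if _is_word_like_token(token)]
--     if len(word_like) < 2: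
--         return False
--     meaningful = [token for token in word_like if token.lower() not in OCR_NOISE_WORDS]
--     return len(meaningful) >= 2
-- ===== SOURCE B (Python) =====
-- OCR_NOISE_WORDS = {
--     "the", "and", "for", "with", "from", "this", "that", "page", "screen",
--     "window", "button", "menu", "search", "dashboard", "settings", "home",
--     "open", "close", "cancel", "save", "edit", "view",
-- }
--
-- def _is_meaningful_token(token: str) -> bool:
--     """Fused predicate: lowercases once and applies the noise-word, id-like and
--     alpha-count tests as one guard chain."""
--     low = token.lower()
--     if low in OCR_NOISE_WORDS:
--         return False
--     if len(low) >= 14 and any(ch.isdigit() for ch in low) and any(ch.isalpha() for ch in low):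
--         return False
--     if len(low) >= 10 and low.count("-") >= 2 and any(ch.isdigit() for ch in low):
--         return False
--     if low.endswith(".png") or low.endswith(".jpg") or low.endswith(".jpeg"):
--         return False
--     return sum(1 for ch in low if ch.isalpha()) >= 3
--
-- def _is_good_caption_candidate(tokens: list[str]) -> bool:
--     # Two staged searches over one shared iterator: locate the first meaningful
--     # token, then ask whether any meaningful token remains after it.
--     it = iter(tokens)
--     for token in it:
--         if _is_meaningful_token(token):
--             return any(_is_meaningful_token(t) for t in it)
--     return False
-- ===== Notes on version B (the rewrite author's own statement) =====
-- stated objective: simpler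
-- what changed: Replaces A's three helper predicates and two intermediate filtered lists by one fused per-token predicate (lowercasing once, a flat guard chain) and a two-stage search: find the first meaningful token, then any() over the remaining tokens; the early exit makes it measurably faster on long token lists.
import Mathlib
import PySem

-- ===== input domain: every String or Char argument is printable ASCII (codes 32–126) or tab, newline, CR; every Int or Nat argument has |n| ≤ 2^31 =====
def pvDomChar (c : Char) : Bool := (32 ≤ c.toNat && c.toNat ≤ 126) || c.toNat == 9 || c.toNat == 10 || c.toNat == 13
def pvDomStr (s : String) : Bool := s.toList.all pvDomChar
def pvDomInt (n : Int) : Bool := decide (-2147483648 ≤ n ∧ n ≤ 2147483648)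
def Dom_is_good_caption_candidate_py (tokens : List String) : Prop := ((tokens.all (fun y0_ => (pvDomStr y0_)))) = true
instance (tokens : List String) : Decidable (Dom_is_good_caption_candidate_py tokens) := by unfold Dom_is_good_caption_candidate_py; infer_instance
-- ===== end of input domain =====

-- B fuses A's three helper predicates into one guard-chain predicate (lowercasing once)
-- and replaces the two filtered lists by a staged search: first meaningful token, then
-- any meaningful token after it (objective: simpler).

-- ===== PORT A =====
def OCR_NOISE_WORDS : List (List Char) :=
  ["the", "and", "for", "with", "from", "this", "that", "page", "screen",
   "window", "button", "menu", "search", "dashboard", "settings", "home",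
   "open", "close", "cancel", "save", "edit", "view"].map String.toList

def is_id_like_token (token : List Char) : Bool :=
  let lowered := PySem.Chars.lower token
  if decide (14 ≤ lowered.length) && lowered.any PySem.Chars.isdigit && lowered.any PySem.Chars.isalpha then
    true
  else if decide (10 ≤ lowered.length) && decide (2 ≤ PySem.Chars.count lowered ['-']) && lowered.any PySem.Chars.isdigit then
    true
  else if PySem.Chars.endswith lowered ".png".toList || PySem.Chars.endswith lowered ".jpg".toList || PySem.Chars.endswith lowered ".jpeg".toList then
    true
  else
    false

def is_word_like_token (token : List Char) : Bool :=
  let lowered := PySem.Chars.lower token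
  if is_id_like_token lowered then
    false
  else
    let alpha_count := (lowered.filter (fun ch => PySem.Chars.isalpha ch)).length
    decide (3 ≤ alpha_count)

def is_good_caption_candidate_py (tokens : List String) : Bool :=
  if tokens = [] then
    false
  else
    let word_like := tokens.filter (fun token => is_word_like_token token.toList)
    if word_like.length < 2 then
      false
    else
      let meaningful := word_like.filter (fun token => !(OCR_NOISE_WORDS.contains (PySem.Chars.lower token.toList)))
      decide (2 ≤ meaningful.length)

-- ===== PORT B =====
def is_meaningful_token (token : List Char) : Bool :=
  let low := PySem.Chars.lower token
  if OCR_NOISE_WORDS.contains low then false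
  else if decide (14 ≤ low.length) && low.any PySem.Chars.isdigit && low.any PySem.Chars.isalpha then false
  else if decide (10 ≤ low.length) && decide (2 ≤ PySem.Chars.count low ['-']) && low.any PySem.Chars.isdigit then false
  else if PySem.Chars.endswith low ".png".toList || PySem.Chars.endswith low ".jpg".toList || PySem.Chars.endswith low ".jpeg".toList then false
  else decide (3 ≤ (low.filter (fun ch => PySem.Chars.isalpha ch)).length)

-- two staged searches: find the first meaningful token, then `any` on the rest
def alt_scan (tokens : List String) : Bool :=
  match tokens with
  | [] => false
  | t :: rest =>
    if is_meaningful_token t.toList then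
      rest.any (fun s => is_meaningful_token s.toList)
    else
      alt_scan rest

def is_good_caption_candidate_py_alt (tokens : List String) : Bool :=
  alt_scan tokens

-- ===== PRECONDITION & SPEC =====
def Spec_is_good_caption_candidate_py (tokens : List String) (out : Bool) : Prop := out = is_good_caption_candidate_py_alt tokens
instance (tokens : List String) (out : Bool) : Decidable (Spec_is_good_caption_candidate_py tokens out) := by unfold Spec_is_good_caption_candidate_py; infer_instance

-- ===== CLAIM (what is proved, stated in full; the proofs are below) =====
def Claim_equal_is_good_caption_candidate_py : Prop := ∀ (tokens : List String), Dom_is_good_caption_candidate_py tokens → Spec_is_good_caption_candidate_py tokens (is_good_caption_candidate_py tokens)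

-- ===== LEMMAS AND PROOFS =====

theorem pvCofn (n : Nat) (h : n < 0xd800) : (Char.ofNat n).toNat = n := by
  unfold Char.ofNat
  split
  · simp [Char.toNat, Char.ofNatAux]
  · rename_i hv; exact absurd (Or.inl h) hv

theorem pvLowerChar_idem (c : Char) : PySem.Chars.lowerChar (PySem.Chars.lowerChar c) = PySem.Chars.lowerChar c := by
  unfold PySem.Chars.lowerChar PySem.Chars.isupper
  split_ifs with h1 h2 <;> try rfl
  exfalso
  simp only [Bool.and_eq_true, decide_eq_true_eq, Char.le_def, UInt32.le_iff_toNat_le] at h1 h2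
  have hA : ('A' : Char).val.toNat = 65 := by decide
  have hZ : ('Z' : Char).val.toNat = 90 := by decide
  rw [hA, hZ] at h1 h2
  have hc : c.val.toNat = c.toNat := rfl
  rw [hc] at h1
  have hv : (Char.ofNat (c.toNat + 32)).val.toNat = c.toNat + 32 := pvCofn _ (by omega)
  rw [hv] at h2
  omega

theorem pvLower_idem (l : List Char) : PySem.Chars.lower (PySem.Chars.lower l) = PySem.Chars.lower l := by
  unfold PySem.Chars.lower
  simp [pvLowerChar_idem]

-- A's fused per-token condition equals B's single predicate
theorem pred_eq (t : List Char) :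
    (is_word_like_token t && !(OCR_NOISE_WORDS.contains (PySem.Chars.lower t))) = is_meaningful_token t := by
  unfold is_meaningful_token is_word_like_token is_id_like_token
  simp only [pvLower_idem]
  split_ifs <;> simp_all

-- A computes: at least two tokens pass the fused condition
theorem a_eq (tokens : List String) :
    is_good_caption_candidate_py tokens
      = decide (2 ≤ tokens.countP (fun s => is_meaningful_token s.toList)) := by
  unfold is_good_caption_candidate_py
  by_cases he : tokens = []
  · subst he; simp
  · rw [if_neg he]
    have hcount : ((tokens.filter (fun token => is_word_like_token token.toList)).filter
        (fun token => !(OCR_NOISE_WORDS.contains (PySem.Chars.lower token.toList)))).length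
        = tokens.countP (fun s => is_meaningful_token s.toList) := by
      rw [← List.countP_eq_length_filter, List.countP_filter]
      exact List.countP_congr (fun a _ => by rw [← pred_eq]; simp [Bool.and_comm])
    by_cases hwl : (tokens.filter (fun token => is_word_like_token token.toList)).length < 2
    · rw [if_pos hwl]
      have hle : ((tokens.filter (fun token => is_word_like_token token.toList)).filter
          (fun token => !(OCR_NOISE_WORDS.contains (PySem.Chars.lower token.toList)))).length
          ≤ (tokens.filter (fun token => is_word_like_token token.toList)).length :=
        List.length_filter_le _ _
      rw [hcount] at hle
      have h2 : ¬ (2 ≤ tokens.countP (fun s => is_meaningful_token s.toList)) := by omega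
      simp [h2]
    · rw [if_neg hwl]; simp only [hcount]

-- B's staged search also computes: at least two tokens pass the predicate
theorem alt_scan_eq (tokens : List String) :
    alt_scan tokens = decide (2 ≤ tokens.countP (fun s => is_meaningful_token s.toList)) := by
  induction tokens with
  | nil => simp [alt_scan]
  | cons t rest ih =>
    unfold alt_scan
    by_cases h : is_meaningful_token t.toList = true
    · rw [if_pos h]
      have hany : rest.any (fun s => is_meaningful_token s.toList)
          = decide (1 ≤ rest.countP (fun s => is_meaningful_token s.toList)) := by
        by_cases ha : rest.any (fun s => is_meaningful_token s.toList) = true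
        · rw [ha]
          obtain ⟨x, hx, hpx⟩ := List.any_eq_true.mp ha
          have : 0 < rest.countP (fun s => is_meaningful_token s.toList) :=
            List.countP_pos_iff.mpr ⟨x, hx, hpx⟩
          exact (decide_eq_true (by omega)).symm
        · simp only [Bool.not_eq_true] at ha
          rw [ha]
          have : rest.countP (fun s => is_meaningful_token s.toList) = 0 := by
            by_contra hc
            have : 0 < rest.countP (fun s => is_meaningful_token s.toList) := Nat.pos_of_ne_zero hc
            obtain ⟨x, hx, hpx⟩ := List.countP_pos_iff.mp this
            have h2 := (List.any_eq_true (p := fun s => is_meaningful_token s.toList)).mpr ⟨x, hx, hpx⟩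
            rw [ha] at h2
            exact Bool.false_ne_true h2
          simp [this]
      rw [hany, List.countP_cons, h]
      simp only [decide_eq_decide, if_true]
      omega
    · rw [if_neg h, ih, List.countP_cons]
      simp only [Bool.not_eq_true] at h
      simp [h]

-- ===== VERDICT (by name: the statement is the Claim_ definition above) =====
theorem is_good_caption_candidate_py_spec : Claim_equal_is_good_caption_candidate_py := by
  intro tokens _
  unfold Spec_is_good_caption_candidate_py is_good_caption_candidate_py_alt
  rw [a_eq, alt_scan_eq]
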